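-- pv_equiv track=rewrite | github.com/dineshpotla/evidence-grounded-drug-safety-decision-support-assistant | src/drug_safety_assistant/retrieval/pubmed.py | _strength_from_pubtypes
-- ===== SOURCE A (Python) =====
-- def _strength_from_pubtypes(pubtypes: list[str]) -> int:
--     lowered = {item.lower() for item in pubtypes}
--     if any("meta-analysis" in item or "systematic review" in item for item in lowered):
--         return 3
--     if any("randomized" in item or "controlled trial" in item for item in lowered):
--         return 2
--     if lowered:
--         return 1
--     return 0
-- ===== SOURCE B (Python) =====
-- def _strength_from_pubtypes(pubtypes: list[str]) -> int:
--     def score(p: str) -> int: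
--         t = p.lower()
--         if "meta-analysis" in t or "systematic review" in t:
--             return 3
--         if "randomized" in t or "controlled trial" in t:
--             return 2
--         return 1
--     best = 0
--     for p in pubtypes:
--         best = max(best, score(p))
--     return best
-- ===== Notes on version B (the rewrite author's own statement) =====
-- stated objective: simpler
-- what changed: Replaces the set comprehension plus three sequential any() scans with a single pass that scores each pubtype (3/2/1) and returns the running maximum, 0 for an empty list.
import Mathlib
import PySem

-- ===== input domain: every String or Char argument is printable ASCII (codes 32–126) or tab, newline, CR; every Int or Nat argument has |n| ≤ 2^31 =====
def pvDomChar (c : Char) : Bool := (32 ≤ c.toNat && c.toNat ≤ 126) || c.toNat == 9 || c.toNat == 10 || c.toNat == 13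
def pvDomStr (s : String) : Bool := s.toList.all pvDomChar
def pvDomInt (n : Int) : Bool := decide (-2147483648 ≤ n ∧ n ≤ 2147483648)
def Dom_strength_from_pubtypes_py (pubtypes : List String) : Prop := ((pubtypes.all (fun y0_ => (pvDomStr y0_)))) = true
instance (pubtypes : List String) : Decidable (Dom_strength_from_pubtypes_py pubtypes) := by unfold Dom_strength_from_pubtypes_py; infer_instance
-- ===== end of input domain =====

-- B replaces the set comprehension plus three sequential any() scans by one pass that
-- scores each pubtype (3/2/1) and keeps the running maximum, 0 for an empty list (simpler).

-- ===== PORT A =====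
def strength_from_pubtypes_py (pubtypes : List String) : Int :=
  let lowered : PySem.Set String := PySem.Set.ofList (pubtypes.map PySem.Str.lower)
  if lowered.any (fun item => PySem.Str.isIn "meta-analysis" item || PySem.Str.isIn "systematic review" item) then 3
  else if lowered.any (fun item => PySem.Str.isIn "randomized" item || PySem.Str.isIn "controlled trial" item) then 2
  else if !lowered.isEmpty then 1
  else 0

-- ===== PORT B =====
def pvScore (p : String) : Int :=
  let t := PySem.Str.lower p
  if PySem.Str.isIn "meta-analysis" t || PySem.Str.isIn "systematic review" t then 3
  else if PySem.Str.isIn "randomized" t || PySem.Str.isIn "controlled trial" t then 2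
  else 1

def strength_from_pubtypes_py_alt (pubtypes : List String) : Int :=
  pubtypes.foldl (fun best p => max best (pvScore p)) 0

-- ===== PRECONDITION & SPEC =====
def Spec_strength_from_pubtypes_py (pubtypes : List String) (out : Int) : Prop := out = strength_from_pubtypes_py_alt pubtypes
instance (pubtypes : List String) (out : Int) : Decidable (Spec_strength_from_pubtypes_py pubtypes out) := by unfold Spec_strength_from_pubtypes_py; infer_instance

-- ===== CLAIM (what is proved, stated in full; the proofs are below) =====
def Claim_equal_strength_from_pubtypes_py : Prop := ∀ (pubtypes : List String), Dom_strength_from_pubtypes_py pubtypes → Spec_strength_from_pubtypes_py pubtypes (strength_from_pubtypes_py pubtypes)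

-- ===== LEMMAS AND PROOFS =====

-- the two tests, as predicates on the original (un-lowered) string
def pvC3 (p : String) : Bool :=
  PySem.Str.isIn "meta-analysis" (PySem.Str.lower p) || PySem.Str.isIn "systematic review" (PySem.Str.lower p)
def pvC2 (p : String) : Bool :=
  PySem.Str.isIn "randomized" (PySem.Str.lower p) || PySem.Str.isIn "controlled trial" (PySem.Str.lower p)

-- any over set(xs) equals any over xs (same members)
theorem pv_any_ofList (xs : List String) (p : String → Bool) :
    (PySem.Set.ofList xs).any p = xs.any p := by
  rcases h : xs.any p with _ | _
  · simp only [List.any_eq_false] at h ⊢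
    intro x hx
    exact h x ((PySem.Set.mem_ofList xs x).mp hx)
  · simp only [List.any_eq_true] at h ⊢
    obtain ⟨x, hx, hp⟩ := h
    exact ⟨x, (PySem.Set.mem_ofList xs x).mpr hx, hp⟩

theorem pv_isEmpty_ofList (xs : List String) :
    (PySem.Set.ofList xs).isEmpty = xs.isEmpty := by
  rcases h : xs.isEmpty with _ | _
  · rw [List.isEmpty_eq_false_iff_exists_mem] at h ⊢
    obtain ⟨x, hx⟩ := h
    exact ⟨x, (PySem.Set.mem_ofList xs x).mpr hx⟩
  · rw [List.isEmpty_iff] at h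
    subst h
    rfl

theorem pv_foldl_max (l : List String) (a : Int) : 0 ≤ a →
    l.foldl (fun best p => max best (pvScore p)) a
      = max a (l.foldr (fun p m => max (pvScore p) m) 0) := by
  induction l generalizing a with
  | nil => intro ha; simpa using ha
  | cons s t ih =>
    intro ha
    rw [List.foldl_cons, List.foldr_cons, ih (max a (pvScore s)) (by omega)]
    omega

theorem pv_foldr_char (l : List String) :
    l.foldr (fun p m => max (pvScore p) m) 0 =
      if l.any pvC3 then 3 else if l.any pvC2 then 2 else if l.isEmpty then 0 else 1 := by
  induction l with
  | nil => simp
  | cons s t ih =>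
    have hsc : pvScore s = if pvC3 s then 3 else if pvC2 s then 2 else 1 := rfl
    simp only [List.foldr_cons, List.any_cons, List.isEmpty_cons, ih, hsc]
    cases h3 : pvC3 s <;> cases h2 : pvC2 s <;>
      simp [h3, h2] <;> split_ifs <;> omega

theorem strength_eq (pubtypes : List String) :
    strength_from_pubtypes_py pubtypes = strength_from_pubtypes_py_alt pubtypes := by
  unfold strength_from_pubtypes_py strength_from_pubtypes_py_alt
  rw [pv_foldl_max _ _ le_rfl, pv_foldr_char]
  simp only [pv_any_ofList, pv_isEmpty_ofList, List.any_map, List.isEmpty_map, Function.comp_def]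
  have h3 : (pubtypes.any fun x => PySem.Str.isIn "meta-analysis" (PySem.Str.lower x)
      || PySem.Str.isIn "systematic review" (PySem.Str.lower x)) = pubtypes.any pvC3 := rfl
  have h2 : (pubtypes.any fun x => PySem.Str.isIn "randomized" (PySem.Str.lower x)
      || PySem.Str.isIn "controlled trial" (PySem.Str.lower x)) = pubtypes.any pvC2 := rfl
  rw [h3, h2]
  split_ifs <;> simp_all

-- ===== VERDICT (by name: the statement is the Claim_ definition above) =====
theorem strength_from_pubtypes_py_spec : Claim_equal_strength_from_pubtypes_py := by
  intro pubtypes _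
  exact strength_eq pubtypes
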